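-- pv_equiv track=rewrite | github.com/Vamshi213/MyProjects | job_dashboard/resume_analyzer/suggestions.py | _missing_skills_advice
-- ===== SOURCE A (Python) =====
-- from typing import Dict, List
--
-- def _missing_skills_advice(missing: List[str]) -> List[Dict]:
--     advice = []
--     priority_map = {
--         # Cloud
--         "aws": ("high", "Most in-demand cloud platform. Add if you've used any AWS service even in side projects"),
--         "kubernetes": ("high", "Required for most platform/backend roles. Even basic kubectl knowledge counts"),
--         "docker": ("high", "Ubiquitous — if you containerised anything, list it"),
--         "terraform": ("medium", "Infrastructure-as-code is expected for senior roles"),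
--         # Languages
--         "go": ("medium", "Growing fast in backend/infra. List if you've used it"),
--         "rust": ("medium", "High signal for systems/infra roles"),
--         "typescript": ("high", "Expected for all modern JS roles — if you use JS, upgrade to TS on your resume"),
--         # Data
--         "dbt": ("medium", "Standard for data engineering stacks"),
--         "kafka": ("medium", "Event streaming knowledge is expected for distributed systems"),
--         # ML
--         "pytorch": ("high", "Industry standard for ML — required for ML roles"),
--         "llm": ("high", "LLM experience is the top differentiator for AI/ML roles right now"),
--         "rag": ("high", "RAG is the most requested AI skill in 2024–2025"),
--     }
--     for skill in missing[:15]: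
--         pri, note = priority_map.get(skill, ("low", f"Required by this job — add if applicable"))
--         advice.append({"skill": skill, "priority": pri, "advice": note})
--     # Sort: high first
--     order = {"high": 0, "medium": 1, "low": 2}
--     return sorted(advice, key=lambda x: order.get(x["priority"], 3))
-- ===== SOURCE B (Python) =====
-- from typing import Dict, List
--
-- def _missing_skills_advice(missing: List[str]) -> List[Dict]:
--     priority_map = {
--         "aws": ("high", "Most in-demand cloud platform. Add if you've used any AWS service even in side projects"),
--         "kubernetes": ("high", "Required for most platform/backend roles. Even basic kubectl knowledge counts"),
--         "docker": ("high", "Ubiquitous — if you containerised anything, list it"),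
--         "terraform": ("medium", "Infrastructure-as-code is expected for senior roles"),
--         "go": ("medium", "Growing fast in backend/infra. List if you've used it"),
--         "rust": ("medium", "High signal for systems/infra roles"),
--         "typescript": ("high", "Expected for all modern JS roles — if you use JS, upgrade to TS on your resume"),
--         "dbt": ("medium", "Standard for data engineering stacks"),
--         "kafka": ("medium", "Event streaming knowledge is expected for distributed systems"),
--         "pytorch": ("high", "Industry standard for ML — required for ML roles"),
--         "llm": ("high", "LLM experience is the top differentiator for AI/ML roles right now"),
--         "rag": ("high", "RAG is the most requested AI skill in 2024–2025"),
--     }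
--     # Bucket sort: only three priorities occur, so one pass into three buckets,
--     # concatenated high -> medium -> low, reproduces the stable sort exactly.
--     high, medium, low = [], [], []
--     for skill in missing[:15]:
--         pri, note = priority_map.get(skill, ("low", "Required by this job — add if applicable"))
--         entry = {"skill": skill, "priority": pri, "advice": note}
--         if pri == "high":
--             high.append(entry)
--         elif pri == "medium":
--             medium.append(entry)
--         else:
--             low.append(entry)
--     return high + medium + low
-- ===== Notes on version B (the rewrite author's own statement) =====
-- stated objective: alternative
-- what changed: The final stable sorted() over the 3-valued priority key is replaced by a single-pass bucket partition into high/medium/low lists concatenated in that order, which reproduces the stable sort including tie order.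
import Mathlib
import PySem

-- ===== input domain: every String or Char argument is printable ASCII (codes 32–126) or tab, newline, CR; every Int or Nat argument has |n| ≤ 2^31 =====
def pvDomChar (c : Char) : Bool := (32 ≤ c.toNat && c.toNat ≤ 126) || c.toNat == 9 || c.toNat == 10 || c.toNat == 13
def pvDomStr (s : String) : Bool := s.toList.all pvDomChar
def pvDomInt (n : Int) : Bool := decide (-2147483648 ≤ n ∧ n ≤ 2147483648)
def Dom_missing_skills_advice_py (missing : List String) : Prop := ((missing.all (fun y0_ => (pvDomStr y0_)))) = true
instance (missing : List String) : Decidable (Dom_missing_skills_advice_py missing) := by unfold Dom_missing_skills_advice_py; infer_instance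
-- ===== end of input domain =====

-- B replaces A's final stable sort by a single-pass bucket partition into high/medium/low
-- lists concatenated in that order (objective: alternative; same values, same tie order).

-- ===== PORT A =====
-- the priority_map literal (both Pythons contain the identical literal; keys are distinct,
-- so the Python dict literal is exactly this items list in source order)
def pvPriorityMap : PySem.Dict String (String × String) := PySem.Dict.mk [
  ("aws", ("high", "Most in-demand cloud platform. Add if you've used any AWS service even in side projects")),
  ("kubernetes", ("high", "Required for most platform/backend roles. Even basic kubectl knowledge counts")),
  ("docker", ("high", "Ubiquitous — if you containerised anything, list it")),
  ("terraform", ("medium", "Infrastructure-as-code is expected for senior roles")),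
  ("go", ("medium", "Growing fast in backend/infra. List if you've used it")),
  ("rust", ("medium", "High signal for systems/infra roles")),
  ("typescript", ("high", "Expected for all modern JS roles — if you use JS, upgrade to TS on your resume")),
  ("dbt", ("medium", "Standard for data engineering stacks")),
  ("kafka", ("medium", "Event streaming knowledge is expected for distributed systems")),
  ("pytorch", ("high", "Industry standard for ML — required for ML roles")),
  ("llm", ("high", "LLM experience is the top differentiator for AI/ML roles right now")),
  ("rag", ("high", "RAG is the most requested AI skill in 2024–2025"))]

def pvDefaultNote : String × String := ("low", "Required by this job — add if applicable")

-- order = {"high": 0, "medium": 1, "low": 2}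
def pvOrder : PySem.Dict String Int := PySem.Dict.mk [("high", 0), ("medium", 1), ("low", 2)]

def missing_skills_advice_py (missing : List String) : List (List (String × String)) :=
  let advice := (PySem.List.slice missing none (some 15)).foldl
    (fun acc skill =>
      let pn := pvPriorityMap.getD skill pvDefaultNote
      acc ++ [[("skill", skill), ("priority", pn.1), ("advice", pn.2)]]) []
  -- x["priority"] ported as get? + getD "": the key is present in every advice dict built
  -- above, so the KeyError branch (none) is unreachable and the default "" is never used
  PySem.List.sorted advice (fun x => pvOrder.getD (((PySem.Dict.mk x).get? "priority").getD "") 3) false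

-- ===== PORT B =====
def missing_skills_advice_py_alt (missing : List String) : List (List (String × String)) :=
  let hml := (PySem.List.slice missing none (some 15)).foldl
    (fun (acc : List (List (String × String)) × List (List (String × String)) × List (List (String × String))) skill =>
      let pn := pvPriorityMap.getD skill pvDefaultNote
      let entry := [("skill", skill), ("priority", pn.1), ("advice", pn.2)]
      if pn.1 == "high" then (acc.1 ++ [entry], acc.2.1, acc.2.2)
      else if pn.1 == "medium" then (acc.1, acc.2.1 ++ [entry], acc.2.2)
      else (acc.1, acc.2.1, acc.2.2 ++ [entry])) ([], [], [])
  hml.1 ++ hml.2.1 ++ hml.2.2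

-- ===== PRECONDITION & SPEC =====
def Spec_missing_skills_advice_py (missing : List String) (out : List (List (String × String))) : Prop := out = missing_skills_advice_py_alt missing
instance (missing : List String) (out : List (List (String × String))) : Decidable (Spec_missing_skills_advice_py missing out) := by unfold Spec_missing_skills_advice_py; infer_instance

-- ===== CLAIM (what is proved, stated in full; the proofs are below) =====
def Claim_equal_missing_skills_advice_py : Prop := ∀ (missing : List String), Dom_missing_skills_advice_py missing → Spec_missing_skills_advice_py missing (missing_skills_advice_py missing)

-- ===== LEMMAS AND PROOFS =====

-- the advice entry built for one skill, and its priority string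
def pvEntry (skill : String) : List (String × String) :=
  let pn := pvPriorityMap.getD skill pvDefaultNote
  [("skill", skill), ("priority", pn.1), ("advice", pn.2)]

def pvPri (skill : String) : String := (pvPriorityMap.getD skill pvDefaultNote).1

lemma pvPri_cases (s : String) : pvPri s = "high" ∨ pvPri s = "medium" ∨ pvPri s = "low" := by
  simp only [pvPri, pvPriorityMap, pvDefaultNote, PySem.Dict.getD, PySem.Dict.get?, List.find?]
  (repeat' split) <;> simp

-- A's sort key evaluated on an advice entry
lemma pvKey_entry (s : String) :
    pvOrder.getD (((PySem.Dict.mk (pvEntry s)).get? "priority").getD "") 3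
      = if pvPri s = "high" then 0 else if pvPri s = "medium" then 1 else 2 := by
  rcases pvPri_cases s with h | h | h <;>
    simp [pvEntry, pvOrder, PySem.Dict.getD, PySem.Dict.get?, List.find?, pvPri] at h ⊢ <;>
    simp [h]

lemma insertBy_cons_of_not_before {α : Type} (before : α → α → Bool) (x y : α) (ys : List α)
    (h : before x y = false) :
    PySem.List.insertBy before x (y :: ys) = y :: PySem.List.insertBy before x ys := by
  simp [PySem.List.insertBy, h]

-- insertBy passes over any prefix it does not go before
lemma insertBy_append_left {α : Type} (before : α → α → Bool) (x : α) (l1 l2 : List α)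
    (h : ∀ y ∈ l1, before x y = false) :
    PySem.List.insertBy before x (l1 ++ l2) = l1 ++ PySem.List.insertBy before x l2 := by
  induction l1 with
  | nil => simp
  | cons y t ih =>
      rw [List.cons_append, insertBy_cons_of_not_before _ _ _ _ (h y (by simp)),
        ih (fun z hz => h z (by simp [hz])), List.cons_append]

lemma insertBy_all_before {α : Type} (before : α → α → Bool) (x : α) (l : List α)
    (h : ∀ y ∈ l, before x y = true) :
    PySem.List.insertBy before x l = x :: l := by
  cases l with
  | nil => rfl
  | cons y t => simp [PySem.List.insertBy, h y (by simp)]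

-- a stable sort by a key taking only the values 0,1,2 is the three-bucket concatenation
lemma sorted_three {α : Type} (xs : List α) (key : α → Int)
    (h : ∀ x ∈ xs, key x = 0 ∨ key x = 1 ∨ key x = 2) :
    PySem.List.sorted xs key false
      = xs.filter (fun x => key x == 0) ++ xs.filter (fun x => key x == 1)
          ++ xs.filter (fun x => key x == 2) := by
  induction xs using List.reverseRecOn with
  | nil => simp [PySem.List.sorted]
  | append_singleton t x ih =>
      have hsort : PySem.List.sorted (t ++ [x]) key false
          = PySem.List.insertBy (fun a b => decide (key a < key b)) x
              (PySem.List.sorted t key false) := by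
        rw [PySem.List.sorted_eq_foldl_insertBy, PySem.List.sorted_eq_foldl_insertBy,
          List.foldl_append]
        rfl
      have ht : ∀ y ∈ t, key y = 0 ∨ key y = 1 ∨ key y = 2 := fun y hy => h y (by simp [hy])
      rw [hsort, ih ht]
      have h0 : ∀ y ∈ t.filter (fun z => key z == 0), key y = 0 := by
        intro y hy; simpa using (List.of_mem_filter hy)
      have h1 : ∀ y ∈ t.filter (fun z => key z == 1), key y = 1 := by
        intro y hy; simpa using (List.of_mem_filter hy)
      have h2 : ∀ y ∈ t.filter (fun z => key z == 2), key y = 2 := by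
        intro y hy; simpa using (List.of_mem_filter hy)
      rcases h x (by simp) with hx | hx | hx
      · rw [List.append_assoc,
          insertBy_append_left _ _ _ _ (fun y hy => by simp [hx, h0 y hy]),
          insertBy_all_before _ _ _ (fun y hy => by
            rcases List.mem_append.1 hy with hy | hy
            · simp [hx, h1 y hy]
            · simp [hx, h2 y hy])]
        simp [List.filter_append, hx]
      · rw [insertBy_append_left _ _ _ _ (fun y hy => by
            rcases List.mem_append.1 hy with hy | hy
            · simp [hx, h0 y hy]
            · simp [hx, h1 y hy]),
          insertBy_all_before _ _ _ (fun y hy => by simp [hx, h2 y hy])]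
        simp [List.filter_append, hx]
      · rw [show (t.filter (fun z => key z == 0) ++ t.filter (fun z => key z == 1))
              ++ t.filter (fun z => key z == 2)
            = ((t.filter (fun z => key z == 0) ++ t.filter (fun z => key z == 1))
              ++ t.filter (fun z => key z == 2)) ++ ([] : List (α)) by simp,
          insertBy_append_left _ _ _ _ (fun y hy => by
            simp only [List.append_assoc, List.mem_append] at hy
            rcases hy with hy | hy | hy
            · simp [hx, h0 y hy]
            · simp [hx, h1 y hy]
            · simp [hx, h2 y hy])]
        simp [PySem.List.insertBy, List.filter_append, hx]

-- B's bucket loop, characterised by filters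
lemma bucket_fold (l : List String) (h m lo : List (List (String × String))) :
    l.foldl
      (fun (acc : List (List (String × String)) × List (List (String × String)) × List (List (String × String))) skill =>
        let pn := pvPriorityMap.getD skill pvDefaultNote
        let entry := [("skill", skill), ("priority", pn.1), ("advice", pn.2)]
        if pn.1 == "high" then (acc.1 ++ [entry], acc.2.1, acc.2.2)
        else if pn.1 == "medium" then (acc.1, acc.2.1 ++ [entry], acc.2.2)
        else (acc.1, acc.2.1, acc.2.2 ++ [entry])) (h, m, lo)
    = (h ++ (l.filter (fun s => pvPri s == "high")).map pvEntry,
       m ++ (l.filter (fun s => pvPri s == "medium")).map pvEntry,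
       lo ++ (l.filter (fun s => !(pvPri s == "high") && !(pvPri s == "medium"))).map pvEntry) := by
  induction l generalizing h m lo with
  | nil => simp
  | cons s t ih =>
      rw [List.foldl_cons]
      rcases pvPri_cases s with hs | hs | hs <;>
        · simp only [pvPri] at hs
          rw [ih]
          simp [hs, pvPri, pvEntry]
  
theorem pvA_eq (missing : List String) :
    missing_skills_advice_py missing
      = ((PySem.List.slice missing none (some 15)).filter (fun s => pvPri s == "high")).map pvEntry
        ++ ((PySem.List.slice missing none (some 15)).filter (fun s => pvPri s == "medium")).map pvEntry
        ++ ((PySem.List.slice missing none (some 15)).filter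
              (fun s => !(pvPri s == "high") && !(pvPri s == "medium"))).map pvEntry := by
  unfold missing_skills_advice_py
  rw [show (fun (acc : List (List (String × String))) (skill : String) =>
        let pn := pvPriorityMap.getD skill pvDefaultNote
        acc ++ [[("skill", skill), ("priority", pn.1), ("advice", pn.2)]])
      = (fun acc skill => acc ++ [pvEntry skill]) from rfl,
    PySem.List.foldl_append_singleton_eq_map, List.nil_append]
  rw [sorted_three _ _ (by
    intro x hx
    rcases List.mem_map.1 hx with ⟨s, _, rfl⟩
    rw [pvKey_entry s]
    rcases pvPri_cases s with hs | hs | hs <;> simp [hs])]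
  have seg : ∀ (p : List (String × String) → Bool) (q : String → Bool),
      (∀ s, p (pvEntry s) = q s) →
      ((PySem.List.slice missing none (some 15)).map pvEntry).filter p
        = ((PySem.List.slice missing none (some 15)).filter q).map pvEntry := by
    intro p q hpq
    rw [List.filter_map]
    exact congrArg (List.map pvEntry) (List.filter_congr (fun s _ => by
      simp [Function.comp, hpq s]))
  rw [seg _ (fun s => pvPri s == "high") (by
      intro s
      simp only [pvKey_entry]
      rcases pvPri_cases s with hs | hs | hs <;> simp [hs]),
    seg _ (fun s => pvPri s == "medium") (by
      intro s
      simp only [pvKey_entry]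
      rcases pvPri_cases s with hs | hs | hs <;> simp [hs]),
    seg _ (fun s => !(pvPri s == "high") && !(pvPri s == "medium")) (by
      intro s
      simp only [pvKey_entry]
      rcases pvPri_cases s with hs | hs | hs <;> simp [hs])]

-- ===== VERDICT (by name: the statement is the Claim_ definition above) =====
theorem missing_skills_advice_py_spec : Claim_equal_missing_skills_advice_py := by
  intro missing _
  show missing_skills_advice_py missing = missing_skills_advice_py_alt missing
  rw [pvA_eq]
  unfold missing_skills_advice_py_alt
  rw [bucket_fold]
  simp [pvPri]
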